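-- pv_equiv track=rewrite | github.com/phongdn/Python | HW3.py | addDict
-- ===== SOURCE A (Python) =====
-- def addDict(d):
--     value = d.values()
--     newDictionary = {}
--     for x in value:
--         y = x.keys()
--         for w in y:
--             if(w not in newDictionary):
--                 newDictionary[w] = x.get(w,0)
--             else:
--                 newDictionary[w] += x.get(w,0)
--     return newDictionary
-- ===== SOURCE B (Python) =====
-- def addDict(d):
--     buckets = {}
--     for x in d.values():
--         for k, v in x.items():
--             buckets.setdefault(k, []).append(v)
--     return {k: sum(vs) for k, vs in buckets.items()}
-- ===== Notes on version B (the rewrite author's own statement) =====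
-- stated objective: alternative
-- what changed: A keeps a running total per key with an if/else membership branch on every key occurrence; B is a two-phase group-then-reduce: it first buckets every value under its key via setdefault-append and then sums each bucket with a comprehension.
import Mathlib
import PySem

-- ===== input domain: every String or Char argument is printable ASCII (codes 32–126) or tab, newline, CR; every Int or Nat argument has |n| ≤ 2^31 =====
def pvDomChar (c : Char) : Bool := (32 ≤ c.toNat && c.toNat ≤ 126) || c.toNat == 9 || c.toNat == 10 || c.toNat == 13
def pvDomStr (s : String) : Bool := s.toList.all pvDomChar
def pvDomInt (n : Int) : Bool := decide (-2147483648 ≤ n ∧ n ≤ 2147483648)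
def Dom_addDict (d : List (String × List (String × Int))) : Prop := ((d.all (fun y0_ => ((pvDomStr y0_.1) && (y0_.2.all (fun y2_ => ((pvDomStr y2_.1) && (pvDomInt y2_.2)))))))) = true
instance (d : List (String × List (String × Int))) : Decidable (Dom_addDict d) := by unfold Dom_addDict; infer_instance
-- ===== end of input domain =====

-- B replaces A's single accumulating pass (membership-branching running totals) with a two-phase group-then-reduce: bucket every value under its key, then sum each bucket; objective: alternative (same cost)


-- ===== PORT A =====
-- inner loop body of A: for w in x.keys(): if w not in newDictionary: nd[w] = x.get(w,0) else: nd[w] += x.get(w,0)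
def addDictStep (nd : PySem.Dict String Int) (x : List (String × Int)) : PySem.Dict String Int :=
  (PySem.Dict.mk x).keys.foldl
    (fun nd w =>
      if nd.contains w = false then nd.insert w ((PySem.Dict.mk x).getD w 0)
      else nd.modify w 0 (· + (PySem.Dict.mk x).getD w 0)) nd

def addDict (d : List (String × List (String × Int))) : List (String × Int) :=
  ((d.map (·.2)).foldl addDictStep PySem.Dict.empty).items

-- ===== PORT B =====
def addDict_alt (d : List (String × List (String × Int))) : List (String × Int) :=
  let buckets := (d.map (·.2)).foldl
    (fun b x => x.foldl (fun b p => b.modify p.1 [] (· ++ [p.2])) b)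
    (PySem.Dict.empty : PySem.Dict String (List Int))
  buckets.items.map (fun p => (p.1, p.2.sum))

-- ===== PRECONDITION & SPEC =====
-- Pre_ excludes association lists with duplicate keys (in the outer dict or inside a nested dict):
-- such lists do not correspond to any Python dict input (a Python dict cannot hold duplicate keys).
def Pre_addDict (d : List (String × List (String × Int))) : Prop :=
  (d.map (·.1)).Nodup ∧ ∀ p ∈ d, (p.2.map (·.1)).Nodup
instance (d : List (String × List (String × Int))) : Decidable (Pre_addDict d) := by unfold Pre_addDict; infer_instance
def pvWitness_addDict : (List (String × List (String × Int))) :=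
  [("a", [("x", 1), ("y", 2)]), ("b", [("x", 3)])]

def Spec_addDict (d : List (String × List (String × Int))) (out : List (String × Int)) : Prop := out = addDict_alt d
instance (d : List (String × List (String × Int))) (out : List (String × Int)) : Decidable (Spec_addDict d out) := by unfold Spec_addDict; infer_instance

-- ===== CLAIM (what is proved, stated in full; the proofs are below) =====
def Claim_equal_addDict : Prop := ∀ (d : List (String × List (String × Int))), Dom_addDict d → Pre_addDict d → Spec_addDict d (addDict d)

-- ===== LEMMAS AND PROOFS =====

-- one step of A's inner loop, seen through getD
theorem addDict_inner_getD (x : List (String × Int)) (nd : PySem.Dict String Int)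
    (w k : String) :
    ((if nd.contains w = false then nd.insert w ((PySem.Dict.mk x).getD w 0)
      else nd.modify w 0 (· + (PySem.Dict.mk x).getD w 0)).getD k 0)
      = nd.getD k 0 + (if k = w then (PySem.Dict.mk x).getD w 0 else 0) := by
  by_cases hc : nd.contains w = false
  · simp only [hc, if_true, PySem.Dict.getD_insert]
    by_cases hk : k = w
    · subst hk; simp [PySem.Dict.getD_of_not_contains nd 0 hc]
    · simp [hk]
  · rw [if_neg hc]
    by_cases hk : k = w
    · subst hk; rw [PySem.Dict.getD_modify_self]; simp
    · rw [PySem.Dict.getD_modify_of_ne _ _ _ hk]; simp [hk]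

-- one step of A's inner loop, seen through keys
theorem addDict_inner_keys (x : List (String × Int)) (nd : PySem.Dict String Int) (w : String) :
    ((if nd.contains w = false then nd.insert w ((PySem.Dict.mk x).getD w 0)
      else nd.modify w 0 (· + (PySem.Dict.mk x).getD w 0)).keys)
      = PySem.Set.add nd.keys w := by
  by_cases hc : nd.contains w = false
  · have hm : w ∉ nd.keys := by
      intro h; rw [← PySem.Dict.contains_iff_mem_keys] at h; simp [h] at hc
    rw [if_pos hc, PySem.Dict.keys_insert_of_not_contains nd _ hc, PySem.Set.add_of_not_mem hm]
  · have hct : nd.contains w = true := by revert hc; cases nd.contains w <;> simp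
    have hm : w ∈ nd.keys := (PySem.Dict.contains_iff_mem_keys nd w).1 hct
    rw [if_neg hc, PySem.Set.add_of_mem hm, PySem.Dict.keys_modify,
      PySem.Dict.keys_insert_of_contains nd _ hct]

theorem addDictStep_getD (x : List (String × Int)) (nd : PySem.Dict String Int) (k : String) :
    (addDictStep nd x).getD k 0
      = nd.getD k 0 + ((x.map (·.1)).count k : Int) * (PySem.Dict.mk x).getD k 0 := by
  unfold addDictStep
  have h : ∀ (ws : List String) (nd : PySem.Dict String Int),
      ((ws.foldl (fun nd w =>
        if nd.contains w = false then nd.insert w ((PySem.Dict.mk x).getD w 0)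
        else nd.modify w 0 (· + (PySem.Dict.mk x).getD w 0)) nd).getD k 0)
        = nd.getD k 0 + (ws.count k : Int) * (PySem.Dict.mk x).getD k 0 := by
    intro ws
    induction ws with
    | nil => intro nd; simp
    | cons w ws ih =>
      intro nd
      rw [List.foldl_cons, ih, addDict_inner_getD, List.count_cons]
      by_cases hk : k = w
      · subst hk; simp; ring
      · simp [Ne.symm hk, hk]
  rw [h]; simp

theorem addDictStep_keys (x : List (String × Int)) (nd : PySem.Dict String Int) :
    (addDictStep nd x).keys = PySem.Set.update nd.keys (x.map (·.1)) := by
  unfold addDictStep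
  have h : ∀ (ws : List String) (nd : PySem.Dict String Int),
      ((ws.foldl (fun nd w =>
        if nd.contains w = false then nd.insert w ((PySem.Dict.mk x).getD w 0)
        else nd.modify w 0 (· + (PySem.Dict.mk x).getD w 0)) nd).keys)
        = PySem.Set.update nd.keys ws := by
    intro ws
    induction ws with
    | nil => intro nd; simp [PySem.Set.update_nil]
    | cons w ws ih =>
      intro nd
      rw [List.foldl_cons, ih, addDict_inner_keys, PySem.Set.update_cons]
  rw [h]; simp

theorem addDict_fold_getD (vs : List (List (String × Int))) (nd : PySem.Dict String Int)
    (k : String) :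
    (vs.foldl addDictStep nd).getD k 0
      = nd.getD k 0
        + (vs.map (fun x => ((x.map (·.1)).count k : Int) * (PySem.Dict.mk x).getD k 0)).sum := by
  induction vs generalizing nd with
  | nil => simp
  | cons x vs ih => rw [List.foldl_cons, ih, addDictStep_getD, List.map_cons, List.sum_cons]; ring

theorem addDict_fold_keys (vs : List (List (String × Int))) (nd : PySem.Dict String Int) :
    (vs.foldl addDictStep nd).keys
      = PySem.Set.update nd.keys (vs.flatMap (fun x => x.map (·.1))) := by
  induction vs generalizing nd with
  | nil => simp [PySem.Set.update_nil]
  | cons x vs ih =>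
    rw [List.foldl_cons, ih, addDictStep_keys, List.flatMap_cons, PySem.Set.update_append]

-- a nested fold over the lists of pairs is the fold over the flattened pair list
theorem foldl_nested_flatMap (l : List (List (String × Int)))
    (g : PySem.Dict String (List Int) → (String × Int) → PySem.Dict String (List Int))
    (b : PySem.Dict String (List Int))  :
    l.foldl (fun b x => x.foldl g b) b = (l.flatMap (fun x => x)).foldl g b := by
  induction l generalizing b with
  | nil => rfl
  | cons x l ih => simp [List.foldl_append, ih]

-- with nodup inner keys, the per-dict bucket contribution is count·getD
theorem filter_sum_eq (x : List (String × Int)) (k : String) (hnd : (x.map (·.1)).Nodup) :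
    ((x.filter (fun p => p.1 == k)).map (·.2)).sum
      = ((x.map (·.1)).count k : Int) * (PySem.Dict.mk x).getD k 0 := by
  induction x with
  | nil => simp
  | cons a x ih =>
    rw [List.map_cons, List.nodup_cons] at hnd
    by_cases hk : a.1 = k
    · subst hk
      have hx : x.filter (fun p => p.1 == a.1) = [] := by
        rw [List.filter_eq_nil_iff]
        intro p hp hq
        exact hnd.1 (List.mem_map.2 ⟨p, hp, (by simpa using hq)⟩)
      have hcnt : (x.map (·.1)).count a.1 = 0 :=
        List.count_eq_zero_of_not_mem hnd.1
      have hget : (PySem.Dict.mk (a :: x)).getD a.1 0 = a.2 := by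
        rw [PySem.Dict.getD_eq_get?_getD]
        cases a
        rw [PySem.Dict.get?_mk_cons]
        simp
      rw [List.filter_cons_of_pos (by simp), List.map_cons, List.sum_cons, hx,
        List.map_cons, List.count_cons_self, hcnt, hget]
      simp
    · have hget : (PySem.Dict.mk (a :: x)).getD k 0 = (PySem.Dict.mk x).getD k 0 := by
        rw [PySem.Dict.getD_eq_get?_getD, PySem.Dict.getD_eq_get?_getD]
        cases a
        rw [PySem.Dict.get?_mk_cons]
        simp_all
      rw [List.filter_cons_of_neg (by simpa using hk), List.map_cons,
        List.count_cons_of_ne (fun h => hk (by simp_all)), hget]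
      exact ih hnd.2

-- ===== VERDICT (by name: the statement is the Claim_ definition above) =====
theorem addDict_spec : Claim_equal_addDict := by
  intro d _ hpre
  unfold Spec_addDict addDict addDict_alt
  dsimp only
  set vs := d.map (·.2) with hvs
  have hnodupx : ∀ x ∈ vs, (x.map (·.1)).Nodup := by
    intro x hx
    rcases List.mem_map.1 (hvs ▸ hx) with ⟨p, hp, rfl⟩
    exact hpre.2 p hp
  set pairs := vs.flatMap (fun x => x) with hpairs
  -- B's nested fold is the fold over the flattened pair list
  rw [foldl_nested_flatMap vs _ _]
  -- keys of both dicts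
  have hkA : (vs.foldl addDictStep PySem.Dict.empty).keys
      = PySem.Set.ofList (pairs.map (·.1)) := by
    rw [addDict_fold_keys]
    simp [PySem.Dict.keys_empty, PySem.Set.update_nil_left, hpairs, List.flatMap_def]
  have hkB : ((pairs.foldl (fun b p => b.modify p.1 [] (· ++ [p.2])) PySem.Dict.empty).keys)
      = PySem.Set.ofList (pairs.map (·.1)) := by
    rw [PySem.Dict.keys_foldl_modify_key pairs (·.1) [] (fun _ p l => l ++ [p.2])]
    simp [PySem.Dict.keys_empty, PySem.Set.update_nil_left]
  have hnA : (vs.foldl addDictStep PySem.Dict.empty).keys.Nodup := by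
    rw [hkA]; exact PySem.Set.nodup_ofList _
  have hnB : ((pairs.foldl (fun b p => b.modify p.1 [] (· ++ [p.2])) PySem.Dict.empty).keys.Nodup) :=
    PySem.Dict.nodup_keys_foldl_modify_key pairs (·.1) [] (fun _ p l => l ++ [p.2]) _
      PySem.Dict.nodup_keys_empty
  rw [PySem.Dict.items_eq_map_keys _ hnA 0, PySem.Dict.items_eq_map_keys _ hnB [], hkA, hkB,
    List.map_map]
  apply List.map_congr_left
  intro k hk
  simp only [Function.comp_apply]
  rw [addDict_fold_getD, PySem.Dict.getD_foldl_modify_append]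
  simp only [PySem.Dict.getD_empty, zero_add, List.nil_append]
  refine Prod.ext rfl ?_
  show (vs.map (fun x => ((x.map (·.1)).count k : Int) * (PySem.Dict.mk x).getD k 0)).sum
      = ((pairs.filter (fun p => p.1 == k)).map (·.2)).sum
  rw [hpairs, List.filter_flatMap, List.map_flatMap, List.flatMap_def, List.sum_flatten]
  conv_rhs => rw [List.map_map]
  refine congrArg List.sum (List.map_congr_left ?_)
  intro x hx
  simp only [Function.comp_apply]
  exact (filter_sum_eq x k (hnodupx x hx)).symm
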